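-- pv_equiv track=rewrite | github.com/JadeSpy/Python-Programs | Bad Encryption using python random library.py | zip2
-- ===== SOURCE A (Python) =====
-- def zip2(l1,l2): #I made this just to learn yield, it's entirely useless.
-- 	l1 = tuple(l1)
-- 	l2 = tuple(l2)
-- 	len_1 = len(l1)
-- 	len_2 = len(l2)
-- 	len_min = len_1 if len_1<len_2 else len_2
-- 	for i in range(len_min):
-- 		yield (l1[i],l2[i])
-- ===== SOURCE B (Python) =====
-- def zip2(l1, l2):
--     # Idiomatic re-implementation: pull from both iterators directly instead of
--     # materialising tuples and indexing by range(min(len,len)).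
--     it1, it2 = iter(l1), iter(l2)
--     while True:
--         try:
--             a = next(it1)
--         except StopIteration:
--             return
--         try:
--             b = next(it2)
--         except StopIteration:
--             return
--         yield (a, b)
-- ===== Notes on version B (the rewrite author's own statement) =====
-- stated objective: idiomatic
-- what changed: Replaced tuple() materialisation plus len/range index access with the iterator protocol: pull next() from each input and stop on StopIteration, as the built-in zip does.
import Mathlib
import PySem

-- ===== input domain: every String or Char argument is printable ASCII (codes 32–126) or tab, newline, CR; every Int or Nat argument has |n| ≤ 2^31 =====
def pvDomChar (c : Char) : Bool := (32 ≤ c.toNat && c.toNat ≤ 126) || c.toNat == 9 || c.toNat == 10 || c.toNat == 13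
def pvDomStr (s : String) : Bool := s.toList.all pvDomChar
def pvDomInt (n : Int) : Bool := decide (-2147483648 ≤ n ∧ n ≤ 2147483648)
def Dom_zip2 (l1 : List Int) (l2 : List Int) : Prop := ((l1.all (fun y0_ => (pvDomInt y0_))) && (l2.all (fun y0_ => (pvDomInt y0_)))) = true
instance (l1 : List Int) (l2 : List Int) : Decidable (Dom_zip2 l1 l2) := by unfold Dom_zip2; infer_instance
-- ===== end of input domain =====

-- B replaces A's tuple/len/range-index generator with the iterator-protocol pull from both inputs (idiomatic, same cost).


-- ===== PORT A =====
-- literal port: materialise lengths, take len_min, yield (l1[i], l2[i]) for i in range(len_min);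
-- every index is in range, so pyGetD with default 0 is exact.
def zip2 (l1 : List Int) (l2 : List Int) : List (Int × Int) :=
  let len1 : Int := l1.length
  let len2 : Int := l2.length
  let lenMin : Int := if len1 < len2 then len1 else len2
  (PySem.List.pyRange 0 lenMin 1).map
    (fun i => (PySem.List.pyGetD l1 i 0, PySem.List.pyGetD l2 i 0))

-- ===== PORT B =====
-- literal port of the iterator-protocol loop: pull the head of each list; if either is exhausted, stop.
def zip2_alt (l1 : List Int) (l2 : List Int) : List (Int × Int) :=
  match l1, l2 with
  | a :: t1, b :: t2 => (a, b) :: zip2_alt t1 t2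
  | _, _ => []

-- ===== PRECONDITION & SPEC =====
def Spec_zip2 (l1 : List Int) (l2 : List Int) (out : List (Int × Int)) : Prop := out = zip2_alt l1 l2
instance (l1 : List Int) (l2 : List Int) (out : List (Int × Int)) : Decidable (Spec_zip2 l1 l2 out) := by unfold Spec_zip2; infer_instance

-- ===== CLAIM (what is proved, stated in full; the proofs are below) =====
def Claim_equal_zip2 : Prop := ∀ (l1 : List Int) (l2 : List Int), Dom_zip2 l1 l2 → Spec_zip2 l1 l2 (zip2 l1 l2)

-- ===== LEMMAS AND PROOFS =====

theorem zip2_alt_eq_zip (l1 l2 : List Int) : zip2_alt l1 l2 = l1.zip l2 := by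
  induction l1 generalizing l2 with
  | nil => cases l2 <;> simp [zip2_alt]
  | cons a t1 ih => cases l2 <;> simp [zip2_alt, ih]

theorem zip2_eq_zip (l1 l2 : List Int) : zip2 l1 l2 = l1.zip l2 := by
  apply List.ext_getElem
  · simp [zip2, PySem.List.length_pyRange_one]
    split_ifs <;> omega
  · intro k h1 h2
    have hk1 : k < l1.length := by
      simp [zip2, PySem.List.length_pyRange_one] at h1
      split_ifs at h1 <;> omega
    have hk2 : k < l2.length := by
      simp [zip2, PySem.List.length_pyRange_one] at h1
      split_ifs at h1 <;> omega
    simp [zip2, PySem.List.getElem_pyRange_one, List.getElem_zip,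
          PySem.List.pyGetD_natCast, List.getD_eq_getElem?_getD,
          List.getElem?_eq_getElem hk1, List.getElem?_eq_getElem hk2]

-- ===== VERDICT (by name: the statement is the Claim_ definition above) =====
theorem zip2_spec : Claim_equal_zip2 := by
  intro l1 l2 _
  unfold Spec_zip2
  rw [zip2_eq_zip, zip2_alt_eq_zip]
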